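-- pv_equiv track=rewrite | github.com/bhardwajRahul/ClawTeam | clawteam/spawn/command_validation.py | _docker_has_mount
-- ===== SOURCE A (Python) =====
-- def _docker_has_mount(prefix: list[str], host_path: str, container_path: str) -> bool:
--     i = 0
--     while i < len(prefix):
--         token = prefix[i]
--         if token in {"-v", "--volume"} and i + 1 < len(prefix):
--             if _volume_targets(prefix[i + 1], host_path, container_path):
--                 return True
--             i += 2
--             continue
--         if token.startswith("--volume=") and _volume_targets(token.split("=", 1)[1], host_path, container_path):
--             return True
--         if token.startswith("--mount="):
--             value = token.split("=", 1)[1]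
--             if _mount_targets(value, host_path, container_path):
--                 return True
--         if token == "--mount" and i + 1 < len(prefix):
--             value = prefix[i + 1]
--             if _mount_targets(value, host_path, container_path):
--                 return True
--             i += 2
--             continue
--         i += 1
--     return False
--
-- def _volume_targets(spec: str, host_path: str, container_path: str) -> bool:
--     parts = spec.split(":")
--     if len(parts) < 2:
--         return False
--     return parts[0] == host_path and parts[1] == container_path
--
-- def _mount_targets(spec: str, host_path: str, container_path: str) -> bool:
--     source_match = f"source={host_path}" in spec or f"src={host_path}" in spec
--     target_match = f"target={container_path}" in spec or f"dst={container_path}" in spec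
--     return source_match and target_match
-- ===== SOURCE B (Python) =====
-- def _classify(token, nxt):
--     """Recognise one mount/volume flag; return (tagged spec or None, tokens consumed)."""
--     if token in ("-v", "--volume") and nxt is not None:
--         return ("volume", nxt), 2
--     if token.startswith("--volume="):
--         return ("volume", token.split("=", 1)[1]), 1
--     if token.startswith("--mount="):
--         return ("mount", token.split("=", 1)[1]), 1
--     if token == "--mount" and nxt is not None:
--         return ("mount", nxt), 2
--     return None, 1
--
--
-- def _docker_has_mount(prefix: list, host_path: str, container_path: str) -> bool:
--     # pass 1: parse the token list into tagged mount/volume specs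
--     specs = []
--     i = 0
--     while i < len(prefix):
--         nxt = prefix[i + 1] if i + 1 < len(prefix) else None
--         spec, consumed = _classify(prefix[i], nxt)
--         if spec is not None:
--             specs.append(spec)
--         i += consumed
--     # pass 2: check the gathered specs
--     return any(_volume_targets(s, host_path, container_path)
--                for kind, s in specs if kind == "volume") \
--         or any(_mount_targets(s, host_path, container_path)
--                for kind, s in specs if kind == "mount")
--
--
-- def _volume_targets(spec: str, host_path: str, container_path: str) -> bool:
--     parts = spec.split(":")
--     if len(parts) < 2:
--         return False
--     return parts[0] == host_path and parts[1] == container_path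
--
--
-- def _mount_targets(spec: str, host_path: str, container_path: str) -> bool:
--     source_match = f"source={host_path}" in spec or f"src={host_path}" in spec
--     target_match = f"target={container_path}" in spec or f"dst={container_path}" in spec
--     return source_match and target_match
-- ===== Notes on version B (the rewrite author's own statement) =====
-- stated objective: alternative
-- what changed: Separates the interleaved scan-and-check into two passes: a parsing pass driven by a _classify helper that turns each flag into a tagged (kind, spec) pair with an explicit consumed-token count, then a checking pass that applies the volume/mount predicates over the gathered specs with any().
import Mathlib
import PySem

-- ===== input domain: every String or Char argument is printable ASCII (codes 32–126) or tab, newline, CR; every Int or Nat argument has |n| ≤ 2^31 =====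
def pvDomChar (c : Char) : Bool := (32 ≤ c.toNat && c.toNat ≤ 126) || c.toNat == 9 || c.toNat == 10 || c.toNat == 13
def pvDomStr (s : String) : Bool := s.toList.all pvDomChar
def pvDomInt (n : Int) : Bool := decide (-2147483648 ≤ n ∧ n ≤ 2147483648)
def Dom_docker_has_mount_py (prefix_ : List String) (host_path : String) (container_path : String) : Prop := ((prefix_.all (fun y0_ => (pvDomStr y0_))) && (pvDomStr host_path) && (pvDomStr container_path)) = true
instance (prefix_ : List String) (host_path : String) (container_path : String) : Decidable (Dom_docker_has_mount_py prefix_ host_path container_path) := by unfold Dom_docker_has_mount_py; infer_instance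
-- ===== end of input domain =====

-- B re-decomposes A's interleaved scan-and-check into a parse pass (tagged specs) plus a checking pass; same cost, return value proved equal.

-- shared module helpers (_volume_targets / _mount_targets, and split("=",1)[1])
def volume_targets (spec host_path container_path : String) : Bool :=
  let parts := (PySem.Str.split? spec ":").getD []
  if parts.length < 2 then false
  else PySem.List.pyGetD parts 0 "" == host_path && PySem.List.pyGetD parts 1 "" == container_path

def mount_targets (spec host_path container_path : String) : Bool :=
  let source_match := PySem.Str.isIn ("source=" ++ host_path) spec || PySem.Str.isIn ("src=" ++ host_path) spec
  let target_match := PySem.Str.isIn ("target=" ++ container_path) spec || PySem.Str.isIn ("dst=" ++ container_path) spec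
  source_match && target_match

-- token.split("=", 1)[1]   (only used under a startswith guard, so the index exists)
def splitEqTail (t : String) : String :=
  PySem.List.pyGetD ((PySem.Str.splitMax? t "=" 1).getD []) 1 ""

-- ===== PORT A =====
def dockerLoopA (host_path container_path : String) : List String → Bool
  | [] => false
  | t :: rest =>
    if (t == "-v" || t == "--volume") && !rest.isEmpty then
      if volume_targets (rest.headD "") host_path container_path then true
      else dockerLoopA host_path container_path (rest.drop 1)
    else if PySem.Str.startswith t "--volume=" && volume_targets (splitEqTail t) host_path container_path then true
    else if PySem.Str.startswith t "--mount=" && mount_targets (splitEqTail t) host_path container_path then true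
    else if t == "--mount" && !rest.isEmpty then
      if mount_targets (rest.headD "") host_path container_path then true
      else dockerLoopA host_path container_path (rest.drop 1)
    else dockerLoopA host_path container_path rest
termination_by l => l.length
decreasing_by all_goals (simp; try omega)

def docker_has_mount_py (prefix_ : List String) (host_path : String) (container_path : String) : Bool :=
  dockerLoopA host_path container_path prefix_

-- ===== PORT B =====
-- _classify: (tagged spec or none, tokens consumed); true = "volume", false = "mount"
def classifyB (token : String) (nxt : Option String) : Option (Bool × String) × Nat :=
  if (token == "-v" || token == "--volume") && nxt.isSome then (some (true, nxt.getD ""), 2)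
  else if PySem.Str.startswith token "--volume=" then (some (true, splitEqTail token), 1)
  else if PySem.Str.startswith token "--mount=" then (some (false, splitEqTail token), 1)
  else if token == "--mount" && nxt.isSome then (some (false, nxt.getD ""), 2)
  else (none, 1)

-- pass 1: parse the token list into tagged specs
def gatherB : List String → List (Bool × String)
  | [] => []
  | t :: rest =>
    let r := classifyB t rest.head?
    r.1.toList ++ gatherB (rest.drop (r.2 - 1))
termination_by l => l.length
decreasing_by simp; try omega

def docker_has_mount_py_alt (prefix_ : List String) (host_path : String) (container_path : String) : Bool :=
  let specs := gatherB prefix_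
  (specs.filter (fun p => p.1)).any (fun p => volume_targets p.2 host_path container_path)
  || (specs.filter (fun p => !p.1)).any (fun p => mount_targets p.2 host_path container_path)

-- ===== PRECONDITION & SPEC =====
def Spec_docker_has_mount_py (prefix_ : List String) (host_path : String) (container_path : String) (out : Bool) : Prop := out = docker_has_mount_py_alt prefix_ host_path container_path
instance (prefix_ : List String) (host_path : String) (container_path : String) (out : Bool) : Decidable (Spec_docker_has_mount_py prefix_ host_path container_path out) := by unfold Spec_docker_has_mount_py; infer_instance

-- ===== CLAIM (what is proved, stated in full; the proofs are below) =====
def Claim_equal_docker_has_mount_py : Prop := ∀ (prefix_ : List String) (host_path : String) (container_path : String), Dom_docker_has_mount_py prefix_ host_path container_path → Spec_docker_has_mount_py prefix_ host_path container_path (docker_has_mount_py prefix_ host_path container_path)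

-- ===== LEMMAS AND PROOFS =====

-- a token starting with "--volume=" cannot start with "--mount="
lemma sv_not_sm (t : String) (h1 : PySem.Str.startswith t "--volume=" = true) :
    PySem.Str.startswith t "--mount=" = false := by
  by_contra h2
  rw [Bool.not_eq_false] at h2
  have p1 := (PySem.Chars.startswith_iff _ _).mp (by simpa using h1)
  have p2 := (PySem.Chars.startswith_iff _ _).mp (by simpa using h2)
  have := List.prefix_of_prefix_length_le p2 p1 (by decide)
  exact absurd this (by decide)

lemma main_equiv (host_path container_path : String) :
    ∀ (n : Nat) (l : List String), l.length ≤ n →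
      dockerLoopA host_path container_path l =
        (((gatherB l).filter (fun p => p.1)).any (fun p => volume_targets p.2 host_path container_path)
         || ((gatherB l).filter (fun p => !p.1)).any (fun p => mount_targets p.2 host_path container_path)) := by
  intro n
  induction n with
  | zero =>
    intro l hl
    have hnil : l = [] := List.length_eq_zero_iff.mp (Nat.le_zero.mp hl)
    subst hnil
    simp [dockerLoopA, gatherB]
  | succ n ih =>
    intro l hl
    cases l with
    | nil => simp [dockerLoopA, gatherB]
    | cons t rest =>
      simp only [List.length_cons, Nat.succ_le_succ_iff] at hl
      cases rest with
      | nil =>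
        by_cases hsv : PySem.Str.startswith t "--volume=" = true
        · have hsm := sv_not_sm t hsv
          have hne : t ≠ "--mount" := by
            intro he; rw [he] at hsv; exact absurd hsv (by decide)
          simp at hsv hsm
          simp [dockerLoopA, gatherB, classifyB, hsv, hsm]
        · by_cases hsm : PySem.Str.startswith t "--mount=" = true
          · have hne : t ≠ "--mount" := by
              intro he; rw [he] at hsm; exact absurd hsm (by decide)
            simp at hsv hsm
            simp [dockerLoopA, gatherB, classifyB, hsv, hsm]
          · simp at hsv hsm
            simp [dockerLoopA, gatherB, classifyB, hsv, hsm]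
      | cons v rest2 =>
        have ih1 := ih (v :: rest2) hl
        have ih2 := ih rest2 (by simp at hl; omega)
        rw [dockerLoopA.eq_2, gatherB.eq_2]
        by_cases h1 : (t == "-v" || t == "--volume") = true
        · cases hvt : volume_targets v host_path container_path <;>
            simp [classifyB, h1, hvt, ih2]
        · have h1' : (t == "-v" || t == "--volume") = false := by simpa using h1
          by_cases hsv : PySem.Str.startswith t "--volume=" = true
          · have hsm := sv_not_sm t hsv
            have hne : t ≠ "--mount" := by
              intro he; rw [he] at hsv; exact absurd hsv (by decide)
            simp at hsv hsm
            cases hvt : volume_targets (splitEqTail t) host_path container_path <;>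
              simp [classifyB, h1', hsv, hsm, hne, hvt, ih1]
          · by_cases hsm : PySem.Str.startswith t "--mount=" = true
            · have hne : t ≠ "--mount" := by
                intro he; rw [he] at hsm; exact absurd hsm (by decide)
              simp at hsv hsm
              cases hmt : mount_targets (splitEqTail t) host_path container_path <;>
                simp [classifyB, h1', hsv, hsm, hne, hmt, ih1]
            · by_cases hm : t = "--mount"
              · subst hm
                have d2 : PySem.Str.startswith "--mount" "--volume=" = false := by decide
                have d3 : PySem.Str.startswith "--mount" "--mount=" = false := by decide
                simp at d2 d3
                cases hmt : mount_targets v host_path container_path <;>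
                  simp [classifyB, d2, d3, hmt, ih2]
              · simp at hsv hsm
                simp [classifyB, h1', hsv, hsm, hm, ih1]

theorem docker_has_mount_py_spec : Claim_equal_docker_has_mount_py := by
  intro p h c _
  unfold Spec_docker_has_mount_py docker_has_mount_py docker_has_mount_py_alt
  exact main_equiv h c p.length p (le_refl _)
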